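-- pv_equiv track=rewrite | github.com/yuhwanwoo/Algorithm | test/tmp.py | solution
-- ===== SOURCE A (Python) =====
-- def solution(amountText):
--     answer = True
--
--     cnt = 0
--
--
--     for i in range(len(amountText)-1, -1, -1):
--         if amountText[i].isdigit():
--             cnt += 1
--         elif amountText[i] == ',':
--             if cnt != 3:
--                 return False
--             cnt = 0
--         else:
--             return False
--     if amountText[0] == ',':
--         return False
--
--     temp = amountText.replace(",","")
--     if int(temp) != 0:
--         if amountText[0] == 0:
--             return False
--     else:
--         if len(amountText) > 1:
--             return False
--     return answer
-- ===== SOURCE B (Python) =====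
-- def solution(amountText):
--     # Simpler: comma-split once and check each group, instead of a manual
--     # reversed character scan with a digit counter.
--     for idx, group in enumerate(amountText.split(',')):
--         if not group.isdigit():
--             return False
--         if idx > 0 and len(group) != 3:
--             return False
--     if int(amountText.replace(',', '')) == 0 and len(amountText) > 1:
--         return False
--     return True
-- ===== Notes on version B (the rewrite author's own statement) =====
-- stated objective: simpler
-- what changed: Replaces A's reversed character-by-character scan with a running digit counter (plus a separate leading-comma check) by a single comma-split followed by a per-group isdigit/length-3 check.
import Mathlib
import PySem

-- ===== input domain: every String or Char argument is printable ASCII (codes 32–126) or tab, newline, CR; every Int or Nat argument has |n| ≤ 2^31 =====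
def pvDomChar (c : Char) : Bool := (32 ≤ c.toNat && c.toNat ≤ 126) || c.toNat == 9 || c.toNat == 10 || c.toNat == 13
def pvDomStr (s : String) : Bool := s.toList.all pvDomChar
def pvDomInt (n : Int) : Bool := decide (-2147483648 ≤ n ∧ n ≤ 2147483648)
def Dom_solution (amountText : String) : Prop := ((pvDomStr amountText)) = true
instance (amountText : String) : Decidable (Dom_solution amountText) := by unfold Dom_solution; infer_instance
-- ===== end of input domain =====

-- B replaces A's reversed character scan with a digit counter by one comma-split
-- and a per-group check (simpler decomposition; same return value on Pre_).


-- ===== PORT A =====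
-- A's loop: for i in range(len-1, -1, -1) scans the characters from the right,
-- i.e. walks amountText.toList.reverse; `none` = an early `return False`.
def solutionLoopA : List Char → Int → Option Int
  | [], cnt => some cnt
  | c :: rest, cnt =>
    if PySem.Chars.isdigit c then solutionLoopA rest (cnt + 1)
    else if c = ',' then (if cnt ≠ 3 then none else solutionLoopA rest 0)
    else none

def solution (amountText : String) : Bool :=
  let cs := amountText.toList
  match solutionLoopA cs.reverse 0 with
  | none => false
  | some _ =>
    -- amountText[0] == ',' ; on the empty string Python raises IndexError (outside Pre_)
    if PySem.List.pyGet? cs 0 = some ',' then false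
    else
      let temp := PySem.Chars.replace cs [','] []
      -- int(temp): whenever this line is reached temp is a nonempty digit string,
      -- so ofChars? is `some`; the getD 0 default is never used on Pre_.
      let v := (PySem.Int.ofChars? temp).getD 0
      if v ≠ 0 then
        -- `amountText[0] == 0` compares a 1-char string with the int 0: always False in Python
        true
      else if cs.length > 1 then false
      else true

-- ===== PORT B =====
-- B's loop: the enumerate loop over the comma-split groups in Source B.
def solutionGroupsB : List (List Char) → Nat → Bool
  | [], _ => true
  | g :: rest, idx =>
    if ¬ PySem.Chars.strIsdigit g then false
    else if 0 < idx ∧ g.length ≠ 3 then false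
    else solutionGroupsB rest (idx + 1)

def solution_alt (amountText : String) : Bool :=
  let cs := amountText.toList
  -- Source B's str.split with a comma: List.splitOn is exact for a one-character separator
  if ¬ solutionGroupsB (List.splitOn ',' cs) 0 then false
  else
    let v := (PySem.Int.ofChars? (PySem.Chars.replace cs [','] [])).getD 0
    if v = 0 ∧ cs.length > 1 then false
    else true

-- ===== PRECONDITION & SPEC =====
-- Pre_ excludes only the empty string, on which A raises IndexError at amountText[0].
def Pre_solution (amountText : String) : Prop := amountText ≠ ""
instance (amountText : String) : Decidable (Pre_solution amountText) := by unfold Pre_solution; infer_instance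
def pvWitness_solution : String := "1,000"

def Spec_solution (amountText : String) (out : Bool) : Prop := out = solution_alt amountText
instance (amountText : String) (out : Bool) : Decidable (Spec_solution amountText out) := by unfold Spec_solution; infer_instance

-- ===== CLAIM (what is proved, stated in full; the proofs are below) =====
def Claim_equal_solution : Prop := ∀ (amountText : String), Dom_solution amountText → Pre_solution amountText → Spec_solution amountText (solution amountText)

-- ===== LEMMAS AND PROOFS =====

-- splitOn of a comma-free list is the single group [l]
lemma splitOn_commaFree (l : List Char) (h : ',' ∉ l) : List.splitOn ',' l = [l] := by
  induction l with
  | nil => rfl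
  | cons a t ih =>
    have ha : (a == ',') = false := by
      simp only [beq_eq_false_iff_ne]; intro e; exact h (e ▸ List.mem_cons_self)
    simp only [List.splitOn, List.splitOnP_cons, ha, if_neg Bool.false_ne_true] at *
    rw [ih (fun hm => h (List.mem_cons_of_mem _ hm))]
    rfl

-- splitting off the last (comma-free) group
lemma splitOn_append_last (xs g : List Char) (hg : ',' ∉ g) :
    List.splitOn ',' (xs ++ ',' :: g) = List.splitOn ',' xs ++ [g] := by
  induction xs with
  | nil =>
    simp only [List.nil_append, List.splitOn, List.splitOnP_cons]
    rw [if_pos (by simp)]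
    rw [show List.splitOnP (fun x => x == ',') g = List.splitOn ',' g from rfl,
        splitOn_commaFree g hg]
    rfl
  | cons a t ih =>
    by_cases ha : a = ','
    · subst ha
      simp only [List.cons_append, List.splitOn, List.splitOnP_cons,
        if_pos (by simp : (((',' : Char)) == ',') = true)]
      rw [show List.splitOnP (fun x => x == ',') (t ++ ',' :: g)
            = List.splitOn ',' (t ++ ',' :: g) from rfl, ih]
      rfl
    · have hb : (a == ',') = false := by simpa using ha
      simp only [List.cons_append, List.splitOn, List.splitOnP_cons, hb,
        if_neg Bool.false_ne_true] at *
      rw [ih]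
      obtain ⟨p, rest, hp⟩ := List.exists_cons_of_ne_nil
        (List.splitOnP_ne_nil (fun x => x == ',') t)
      rw [hp]; rfl

-- appending one more group behind a nonempty prefix of groups
lemma groupsB_append_last (l : List (List Char)) (g : List Char) (idx : Nat)
    (h : l ≠ [] ∨ 0 < idx) :
    solutionGroupsB (l ++ [g]) idx
      = (solutionGroupsB l idx && (PySem.Chars.strIsdigit g && g.length == 3)) := by
  induction l generalizing idx with
  | nil =>
    have hidx : 0 < idx := h.resolve_left (fun h' => h' rfl)
    simp only [List.nil_append, solutionGroupsB]
    by_cases hd : PySem.Chars.strIsdigit g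
    · by_cases hl : g.length = 3 <;> simp [hd, hl, hidx]
    · simp [hd]
  | cons p rest ih =>
    simp only [List.cons_append, solutionGroupsB]
    by_cases h1 : PySem.Chars.strIsdigit p
    · by_cases h2 : 0 < idx ∧ p.length ≠ 3
      · simp [h1, h2]
      · simp only [h1, if_neg h2, not_true, if_neg (fun f : False => f)]
        simpa using ih (idx + 1) (Or.inr (Nat.succ_pos idx))
    · simp [h1]

-- if all groups pass, every group is a digit string
lemma groupsB_all_digit (l : List (List Char)) (idx : Nat)
    (h : solutionGroupsB l idx = true) : ∀ g ∈ l, PySem.Chars.strIsdigit g = true := by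
  induction l generalizing idx with
  | nil => simp
  | cons p rest ih =>
    simp only [solutionGroupsB] at h
    by_cases h1 : PySem.Chars.strIsdigit p
    · by_cases h2 : 0 < idx ∧ p.length ≠ 3
      · simp [h1, h2] at h
      · simp only [h1, if_neg h2, not_true, if_neg (fun f : False => f)] at h
        intro g hg
        rcases List.mem_cons.1 hg with rfl | hg
        · exact h1
        · exact ih (idx + 1) h g hg
    · simp [h1] at h

-- every non-comma character of xs lies inside some group of splitOn
lemma mem_splitOn_of_mem (xs : List Char) (c : Char) (hc : c ∈ xs) (hne : c ≠ ',') :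
    ∃ p ∈ List.splitOn ',' xs, c ∈ p := by
  induction xs with
  | nil => cases hc
  | cons a t ih =>
    by_cases ha : a = ','
    · subst ha
      rcases List.mem_cons.1 hc with rfl | hc'
      · exact absurd rfl hne
      · obtain ⟨p, hp, hcp⟩ := ih hc'
        refine ⟨p, ?_, hcp⟩
        simp only [List.splitOn, List.splitOnP_cons, if_pos (by simp : (((',' : Char)) == ',') = true), List.mem_cons]
        exact Or.inr hp
    · have hb : (a == ',') = false := by simpa using ha
      have hrec : List.splitOn ',' (a :: t)
          = List.modifyHead (List.cons a) (List.splitOn ',' t) := by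
        simp [List.splitOn, List.splitOnP_cons, hb]
      obtain ⟨p0, rest, hp0⟩ := List.exists_cons_of_ne_nil
        (List.splitOnP_ne_nil (fun x => x == ',') t)
      have hsp : List.splitOn ',' t = p0 :: rest := hp0
      rcases List.mem_cons.1 hc with rfl | hc'
      · exact ⟨c :: p0, by rw [hrec, hsp]; simp, List.mem_cons_self⟩
      · obtain ⟨p, hp, hcp⟩ := ih hc'
        rw [hsp] at hp
        rcases List.mem_cons.1 hp with rfl | hp'
        · exact ⟨a :: p, by rw [hrec, hsp]; simp, List.mem_cons_of_mem _ hcp⟩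
        · exact ⟨p, by rw [hrec, hsp]; simp [hp'], hcp⟩

-- a non-digit, non-comma character falsifies B's group check
lemma groupsB_false_of_badchar (xs : List Char) (c : Char) (hc : c ∈ xs)
    (hd : PySem.Chars.isdigit c = false) (hne : c ≠ ',') (idx : Nat) :
    solutionGroupsB (List.splitOn ',' xs) idx = false := by
  by_contra hcon
  have htrue : solutionGroupsB (List.splitOn ',' xs) idx = true := by
    revert hcon; cases solutionGroupsB (List.splitOn ',' xs) idx <;> simp
  obtain ⟨p, hp, hcp⟩ := mem_splitOn_of_mem xs c hc hne
  have hpd := groupsB_all_digit _ _ htrue p hp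
  simp only [PySem.Chars.strIsdigit, Bool.and_eq_true, List.all_eq_true] at hpd
  have := hpd.2 c hcp
  rw [hd] at this
  exact absurd this (by decide)

-- nonempty all-digit lists are digit strings
lemma strIsdigit_of_digits (l : List Char) (h : l ≠ [])
    (hd : ∀ c ∈ l, PySem.Chars.isdigit c = true) :
    PySem.Chars.strIsdigit l = true := by
  simp [PySem.Chars.strIsdigit, List.all_eq_true, h]
  exact fun c hc => hd c hc

lemma key (ys acc : List Char) (hacc : ∀ c ∈ acc, PySem.Chars.isdigit c = true)
    (hne : ys ≠ [] ∨ acc ≠ []) :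
    ((solutionLoopA ys (acc.length : Int)).isSome
        && !((ys.reverse ++ acc).head? == some ','))
      = solutionGroupsB (List.splitOn ',' (ys.reverse ++ acc)) 0 := by
  induction ys generalizing acc with
  | nil =>
    have hacc' : acc ≠ [] := hne.resolve_left (fun h => h rfl)
    obtain ⟨c, t, rfl⟩ := List.exists_cons_of_ne_nil hacc'
    have hcd : PySem.Chars.isdigit c = true := hacc c List.mem_cons_self
    have hcne : (c : Char) ≠ ',' := by
      intro e; rw [e] at hcd; exact absurd hcd (by decide)
    have hnc : ',' ∉ c :: t := by
      intro hm
      exact absurd (hacc ',' hm) (by decide)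
    simp only [List.reverse_nil, List.nil_append, splitOn_commaFree _ hnc]
    simp [solutionLoopA, solutionGroupsB, strIsdigit_of_digits _ (by simp) hacc]
    exact hcne
  | cons c ys' ih =>
    have hu : (c :: ys').reverse ++ acc = ys'.reverse ++ c :: acc := by
      simp
    by_cases hcd : PySem.Chars.isdigit c = true
    · -- digit branch of A's loop
      have hstep : solutionLoopA (c :: ys') (acc.length : Int)
          = solutionLoopA ys' ((c :: acc).length : Int) := by
        simp [solutionLoopA, hcd]
      rw [hu, hstep]
      exact ih (c :: acc) (fun d hd => by rcases List.mem_cons.1 hd with rfl | hd'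
                                          exacts [hcd, hacc d hd']) (Or.inr (by simp))
    · by_cases hc : c = ','
      · subst hc
        have hnc : ',' ∉ acc := fun hm => absurd (hacc ',' hm) (by decide)
        rw [hu, splitOn_append_last _ _ hnc]
        have hnn : List.splitOn ',' ys'.reverse ≠ [] := List.splitOnP_ne_nil _ _
        by_cases h3 : acc.length = 3
        · have hloop : solutionLoopA (',' :: ys') (acc.length : Int) = solutionLoopA ys' 0 := by
            simp only [solutionLoopA,
              if_neg (show ¬ PySem.Chars.isdigit ',' = true by decide)]
            rw [if_neg (show ¬ ((acc.length : Int) ≠ 3) by simp [h3])]; simp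
          by_cases hys' : ys' = []
          · subst hys'
            have hd : PySem.Chars.strIsdigit acc = true :=
              strIsdigit_of_digits acc (by intro e; rw [e] at h3; simp at h3) hacc
            simp [solutionLoopA, solutionGroupsB, List.splitOn,
              PySem.Chars.strIsdigit]
          · rw [hloop, groupsB_append_last _ _ _ (Or.inl hnn)]
            obtain ⟨q, r, hq⟩ := List.exists_cons_of_ne_nil
              (show ys'.reverse ≠ [] by simpa using hys')
            have hihp := ih [] (by simp) (Or.inl hys')
            rw [List.append_nil] at hihp
            have hd : PySem.Chars.strIsdigit acc = true :=
              strIsdigit_of_digits acc (by intro e; rw [e] at h3; simp at h3) hacc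
            rw [hq] at hihp ⊢
            simp only [List.cons_append, List.head?_cons] at hihp ⊢
            rw [← hihp]
            simp [hd, h3]
        · -- cnt ≠ 3 at a comma: A returns False; B's last group has wrong length
          have hloop : solutionLoopA (',' :: ys') (acc.length : Int) = none := by
            simp only [solutionLoopA,
              if_neg (show ¬ PySem.Chars.isdigit ',' = true by decide)]
            rw [if_pos (show ((acc.length : Int) ≠ 3) by exact_mod_cast h3)]; simp
          rw [hloop, groupsB_append_last _ _ _ (Or.inl hnn)]
          simp [h3]
      · -- bad character: both sides False
        have hloop : solutionLoopA (c :: ys') (acc.length : Int) = none := by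
          simp [solutionLoopA, hcd, hc]
        have hmem : c ∈ (c :: ys').reverse ++ acc := by simp
        rw [hloop, groupsB_false_of_badchar _ c hmem (Bool.eq_false_iff.2 hcd) hc 0]
        simp

-- ===== VERDICT (by name: the statement is the Claim_ definition above) =====
theorem solution_spec : Claim_equal_solution := by
  unfold Claim_equal_solution Spec_solution
  intro s _ hpre
  have hcs : s.toList ≠ [] := by
    intro h
    exact hpre (String.toList_eq_nil_iff.mp h)
  obtain ⟨c, t, hct⟩ := List.exists_cons_of_ne_nil hcs
  have hkey := key s.toList.reverse [] (by simp) (Or.inl (by simp [hct]))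
  rw [List.reverse_reverse, List.append_nil] at hkey
  simp only [List.length_nil, Nat.cast_zero] at hkey
  simp only [solution, solution_alt]
  cases hA : solutionLoopA s.toList.reverse 0 with
  | none =>
    rw [hA] at hkey
    simp only [Option.isSome_none, Bool.false_and] at hkey
    rw [← hkey]
    simp
  | some k =>
    rw [hA] at hkey
    simp only [Option.isSome_some, Bool.true_and] at hkey
    by_cases hcomma : c = ','
    · subst hcomma
      have hhead : s.toList.head? = some ',' := by rw [hct]; rfl
      rw [hhead] at hkey
      simp only [BEq.rfl, Bool.not_true] at hkey
      rw [← hkey]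
      simp [hct, PySem.List.pyGet?, PySem.List.pyIdx?]
    · have hhead : (s.toList.head? == some ',') = false := by
        rw [hct]; simpa using hcomma
      rw [hhead] at hkey
      simp only [Bool.not_false] at hkey
      rw [← hkey]
      have hget : PySem.List.pyGet? s.toList 0 = some c := by
        rw [hct]; simp [PySem.List.pyGet?, PySem.List.pyIdx?]
      rw [if_neg (by rw [hget]; simpa using hcomma)]
      by_cases hv : (PySem.Int.ofChars? (PySem.Chars.replace s.toList [','] [])).getD 0 = 0
      · simp only [hv]
        split_ifs with h1 h2 <;> simp_all
      · simp [hv]
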